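-- pv_equiv track=rewrite | github.com/mouredev/roadmap-retos-programacion | Roadmap/35 - REPARTIENDO LOS ANILLOS DE PODER/python/nlarrea.py | combine_options
-- ===== SOURCE A (Python) =====
-- def is_even(number: int) -> bool:
--     return number % 2 == 0
--
-- def is_prime(number: int) -> bool:
--     if number < 2:
--         return False
--
--     for n in range(2, number):
--         if number % n == 0:
--             return False
--
--     return True
--
-- def odd_numbers(number: int) -> list[int]:
--     return list(filter(lambda n: not is_even(n), range(1, number)))
--
-- def even_numbers(number: int) -> list[int]:
--     return list(filter(lambda n: is_even(n), range(1, number)))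
--
-- def combine_options(total_rings: int) -> list[dict[str, int]]:
--     solution = []
--
--     # Give one ring to Sauron
--     total_rings -= 1
--
--     # Get possible values for the rest races
--     for man in even_numbers(total_rings):
--         for elf in odd_numbers(total_rings):
--             dwarf = total_rings - elf - man
--             if dwarf > 0 and is_prime(dwarf):
--                 solution.append(
--                     {
--                         "Elfos": elf,
--                         "Enanos": dwarf,
--                         "Hombres": man,
--                         "Sauron": 1,
--                     }
--                 )
--
--     return solution
-- ===== SOURCE B (Python) =====
-- def combine_options(total_rings):
--     total_rings -= 1
--
--     # Precompute once the set of primes below total_rings (sqrt-bounded trial division),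
--     # so the nested loops below do an O(1) membership test instead of an O(n) scan.
--     primes = set()
--     for d in range(2, total_rings):
--         k = 2
--         is_p = True
--         while k * k <= d:
--             if d % k == 0:
--                 is_p = False
--                 break
--             k += 1
--         if is_p:
--             primes.add(d)
--
--     solution = []
--     for man in range(2, total_rings, 2):
--         for elf in range(1, total_rings, 2):
--             dwarf = total_rings - elf - man
--             if dwarf in primes:
--                 solution.append(
--                     {
--                         "Elfos": elf,
--                         "Enanos": dwarf,
--                         "Hombres": man,
--                         "Sauron": 1,
--                     }
--                 )
--     return solution
-- ===== Notes on version B (the rewrite author's own statement) =====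
-- stated objective: alternative
-- what changed: B precomputes the set of primes below total_rings once with sqrt-bounded trial division and iterates men/elves as stepped ranges, so the nested loops do a set-membership test instead of A's per-candidate trial-division scan.
import Mathlib
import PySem

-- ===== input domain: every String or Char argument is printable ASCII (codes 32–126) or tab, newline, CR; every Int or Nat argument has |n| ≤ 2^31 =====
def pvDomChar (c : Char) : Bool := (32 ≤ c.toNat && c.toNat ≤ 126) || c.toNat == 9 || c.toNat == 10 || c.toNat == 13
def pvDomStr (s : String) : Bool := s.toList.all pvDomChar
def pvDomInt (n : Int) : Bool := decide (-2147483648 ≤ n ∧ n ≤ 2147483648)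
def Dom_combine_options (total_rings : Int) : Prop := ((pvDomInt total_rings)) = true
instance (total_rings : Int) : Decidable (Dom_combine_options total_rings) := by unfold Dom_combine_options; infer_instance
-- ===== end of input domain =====

-- B precomputes the prime set once (sqrt-bounded trial division) and iterates men/elves as
-- stepped ranges, so the nested loops do a set-membership test instead of per-candidate trial division.


-- ===== PORT A =====
def pv_is_even (number : Int) : Bool := PySem.Int.mod number 2 == 0

def pv_is_prime (number : Int) : Bool :=
  if number < 2 then false
  else (PySem.List.pyRange 2 number 1).all (fun n => !(PySem.Int.mod number n == 0))

def pv_odd_numbers (number : Int) : List Int :=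
  (PySem.List.pyRange 1 number 1).filter (fun n => !pv_is_even n)

def pv_even_numbers (number : Int) : List Int :=
  (PySem.List.pyRange 1 number 1).filter (fun n => pv_is_even n)

def combine_options (total_rings : Int) : List (List (String × Int)) :=
  let tr := total_rings - 1
  (pv_even_numbers tr).foldl (fun sol man =>
    (pv_odd_numbers tr).foldl (fun sol elf =>
      let dwarf := tr - elf - man
      if decide (dwarf > 0) && pv_is_prime dwarf then
        sol ++ [[("Elfos", elf), ("Enanos", dwarf), ("Hombres", man), ("Sauron", 1)]]
      else sol) sol) []

-- ===== PORT B =====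
-- the inner 'while k*k <= d' trial-division loop of Source B (break → false)
def pvTrialLoop (d k : Int) : Bool :=
  if k * k ≤ d then
    (if PySem.Int.mod d k == 0 then false else pvTrialLoop d (k + 1))
  else true
termination_by (d + 2 - k).toNat
decreasing_by
  have h2 : 4 * k ≤ 4 * d + 1 := by nlinarith [sq_nonneg (2 * k - 1)]
  omega

-- the 'primes' set Source B builds once before the nested loops
def pvSieve (t : Int) : PySem.Set Int :=
  (PySem.List.pyRange 2 t 1).foldl
    (fun s d => if pvTrialLoop d 2 then PySem.Set.add s d else s) PySem.Set.empty

def combine_options_alt (total_rings : Int) : List (List (String × Int)) :=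
  let tr := total_rings - 1
  let primes := pvSieve tr
  (PySem.List.pyRange 2 tr 2).foldl (fun sol man =>
    (PySem.List.pyRange 1 tr 2).foldl (fun sol elf =>
      let dwarf := tr - elf - man
      if PySem.Set.contains primes dwarf then
        sol ++ [[("Elfos", elf), ("Enanos", dwarf), ("Hombres", man), ("Sauron", 1)]]
      else sol) sol) []

-- ===== PRECONDITION & SPEC =====
def Spec_combine_options (total_rings : Int) (out : List (List (String × Int))) : Prop := out = combine_options_alt total_rings
instance (total_rings : Int) (out : List (List (String × Int))) : Decidable (Spec_combine_options total_rings out) := by unfold Spec_combine_options; infer_instance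

-- ===== CLAIM (what is proved, stated in full; the proofs are below) =====
def Claim_equal_combine_options : Prop := ∀ (total_rings : Int), Dom_combine_options total_rings → Spec_combine_options total_rings (combine_options total_rings)

-- ===== LEMMAS AND PROOFS =====

lemma pairwise_pyRange_two (a b : Int) : (PySem.List.pyRange a b 2).Pairwise (· < ·) := by
  rw [PySem.List.pyRange_of_pos a b (by norm_num)]
  exact (List.pairwise_lt_range).map _ (by intro x y h; omega)

lemma even_numbers_eq (t : Int) : pv_even_numbers t = PySem.List.pyRange 2 t 2 := by
  have h1 : (pv_even_numbers t).Pairwise (· < ·) :=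
    (PySem.List.pairwise_lt_pyRange_one 1 t).filter _
  have h2 : (PySem.List.pyRange 2 t 2).Pairwise (· < ·) := pairwise_pyRange_two 2 t
  refine List.Perm.eq_of_pairwise (fun a b _ _ g1 g2 => absurd g2 (lt_asymm g1)) h1 h2 ?_
  rw [List.perm_ext_iff_of_nodup (h1.imp ne_of_lt) (h2.imp ne_of_lt)]
  intro x
  simp only [pv_even_numbers, pv_is_even, List.mem_filter, PySem.List.mem_pyRange_one,
    PySem.List.mem_pyRange_iff_of_pos (by norm_num : (0:Int) < 2), beq_iff_eq,
    PySem.Int.mod_eq_zero_iff_dvd]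
  omega

lemma odd_numbers_eq (t : Int) : pv_odd_numbers t = PySem.List.pyRange 1 t 2 := by
  have h1 : (pv_odd_numbers t).Pairwise (· < ·) :=
    (PySem.List.pairwise_lt_pyRange_one 1 t).filter _
  have h2 : (PySem.List.pyRange 1 t 2).Pairwise (· < ·) := pairwise_pyRange_two 1 t
  refine List.Perm.eq_of_pairwise (fun a b _ _ g1 g2 => absurd g2 (lt_asymm g1)) h1 h2 ?_
  rw [List.perm_ext_iff_of_nodup (h1.imp ne_of_lt) (h2.imp ne_of_lt)]
  intro x
  simp only [pv_odd_numbers, pv_is_even, List.mem_filter, PySem.List.mem_pyRange_one,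
    PySem.List.mem_pyRange_iff_of_pos (by norm_num : (0:Int) < 2),
    Bool.not_eq_eq_eq_not, Bool.not_true, beq_eq_false_iff_ne, ne_eq,
    PySem.Int.mod_eq_zero_iff_dvd]
  omega

lemma pvTrialLoop_iff (d k : Int) (hk : 0 < k) :
    pvTrialLoop d k = true ↔ ∀ j : Int, k ≤ j → j * j ≤ d → ¬ (j ∣ d) := by
  fun_induction pvTrialLoop d k with
  | case1 k hkk hdvd =>
    simp only [Bool.false_eq_true, false_iff]
    intro hAll
    exact hAll k (le_refl k) hkk ((PySem.Int.mod_eq_zero_iff_dvd d k).mp (beq_iff_eq.mp hdvd))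
  | case2 k hkk hdvd ih =>
    rw [ih (by omega)]
    constructor
    · intro h j hj hjj
      rcases eq_or_lt_of_le hj with rfl | hlt
      · rw [← PySem.Int.mod_eq_zero_iff_dvd]
        intro hc; exact hdvd (beq_iff_eq.mpr hc)
      · exact h j (by omega) hjj
    · intro h j hj hjj
      exact h j (by omega) hjj
  | case3 k hkk =>
    simp only [true_iff]
    intro j hj hjj
    exfalso
    have : k * k ≤ j * j := mul_le_mul hj hj (by omega) (by omega)
    omega

lemma is_prime_iff (x : Int) (h2 : 2 ≤ x) : pv_is_prime x = true ↔ Nat.Prime x.toNat := by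
  have hx : (x.toNat : Int) = x := Int.toNat_of_nonneg (by omega)
  simp only [pv_is_prime, if_neg (by omega : ¬ x < 2), List.all_eq_true,
    PySem.List.mem_pyRange_one, Bool.not_eq_eq_eq_not, Bool.not_true, beq_eq_false_iff_ne,
    ne_eq]
  constructor
  · intro h
    rw [Nat.prime_def_lt]
    refine ⟨by omega, ?_⟩
    intro m hm hdvd
    by_contra hm1
    have hm0 : m ≠ 0 := by rintro rfl; simp at hdvd; omega
    have hm2 : 2 ≤ m := by omega
    have : ((m : Int)) ∣ x := by rw [← hx]; exact_mod_cast hdvd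
    exact h (m : Int) ⟨by exact_mod_cast hm2, by rw [← hx]; exact_mod_cast hm⟩
      ((PySem.Int.mod_eq_zero_iff_dvd x m).mpr this)
  · intro hp n ⟨hn2, hnx⟩ hmod
    have hdvd : n ∣ x := (PySem.Int.mod_eq_zero_iff_dvd x n).mp hmod
    have hn : (n.toNat : Int) = n := Int.toNat_of_nonneg (by omega)
    have hdn : n.toNat ∣ x.toNat := by
      rw [← Int.natCast_dvd_natCast, hn, hx]; exact hdvd
    have := (Nat.prime_def_lt.mp hp).2 n.toNat (by omega) hdn
    omega

lemma trial_iff_prime (x : Int) (h2 : 2 ≤ x) : pvTrialLoop x 2 = true ↔ Nat.Prime x.toNat := by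
  have hx : (x.toNat : Int) = x := Int.toNat_of_nonneg (by omega)
  rw [pvTrialLoop_iff x 2 (by norm_num), Nat.prime_def_le_sqrt]
  constructor
  · intro h
    refine ⟨by omega, ?_⟩
    intro m hm hsq hdvd
    have hmm : (m : Int) * (m : Int) ≤ x := by
      have := Nat.le_sqrt.mp hsq
      calc ((m : Int)) * m = ((m * m : Nat) : Int) := by push_cast; ring
        _ ≤ (x.toNat : Int) := by exact_mod_cast this
        _ = x := hx
    exact h (m : Int) (by exact_mod_cast hm) hmm (by rw [← hx]; exact_mod_cast hdvd)
  · rintro ⟨-, h⟩ j hj hjj hdvd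
    have hjn : (j.toNat : Int) = j := Int.toNat_of_nonneg (by omega)
    have hsq : j.toNat ≤ x.toNat.sqrt := by
      rw [Nat.le_sqrt]
      have : ((j.toNat * j.toNat : Nat) : Int) ≤ ((x.toNat : Nat) : Int) := by
        push_cast; rw [hjn, hx]; exact hjj
      exact_mod_cast this
    exact h j.toNat (by omega) hsq (by rw [← Int.natCast_dvd_natCast, hjn, hx] at *; exact hdvd)

lemma contains_pvSieve (t w : Int) :
    PySem.Set.contains (pvSieve t) w = true ↔ 2 ≤ w ∧ w < t ∧ pvTrialLoop w 2 = true := by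
  unfold pvSieve
  rw [PySem.List.foldl_if_eq_foldl_filter]
  have : PySem.Set.empty = ([] : List Int) := rfl
  rw [this, ← PySem.Set.ofList_eq_foldl, PySem.Set.contains_iff, PySem.Set.mem_ofList,
    List.mem_filter, PySem.List.mem_pyRange_one]
  tauto

lemma cond_eq (t w : Int) (hw : w < t) :
    (decide (w > 0) && pv_is_prime w) = PySem.Set.contains (pvSieve t) w := by
  rcases lt_or_ge w 2 with h | h
  · have h1 : pv_is_prime w = false := by simp [pv_is_prime, h]
    rw [h1, Bool.and_false]
    by_contra hc
    have := (contains_pvSieve t w).mp (by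
      cases hb : PySem.Set.contains (pvSieve t) w
      · exact absurd hb.symm hc
      · rfl)
    omega
  · have hpos : decide (w > 0) = true := by simp; omega
    rw [hpos, Bool.true_and]
    rw [Bool.eq_iff_iff, is_prime_iff w h, contains_pvSieve t w]
    rw [← trial_iff_prime w h]
    constructor
    · intro hp; exact ⟨h, hw, hp⟩
    · rintro ⟨-, -, hp⟩; exact hp

-- ===== VERDICT (by name: the statement is the Claim_ definition above) =====
theorem combine_options_spec : Claim_equal_combine_options := by
  intro total_rings _
  unfold Spec_combine_options
  dsimp only [combine_options, combine_options_alt]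
  rw [even_numbers_eq, odd_numbers_eq]
  apply PySem.List.foldl_congr_mem
  intro acc man hman
  apply PySem.List.foldl_congr_mem
  intro acc2 elf helf
  obtain ⟨hm2, -, -⟩ :=
    (PySem.List.mem_pyRange_iff_of_pos (by norm_num : (0:Int) < 2) man).mp hman
  obtain ⟨he1, -, -⟩ :=
    (PySem.List.mem_pyRange_iff_of_pos (by norm_num : (0:Int) < 2) elf).mp helf
  have hd : total_rings - 1 - elf - man < total_rings - 1 := by omega
  show (if (decide (total_rings - 1 - elf - man > 0) && pv_is_prime (total_rings - 1 - elf - man)) = true then _ else _) = _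
  rw [cond_eq _ _ hd]
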